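-- pv_equiv track=rewrite | github.com/BoboTiG/gps-map-hikers | host/app.py | check_for_sos
-- ===== SOURCE A (Python) =====
-- def check_for_sos(traces: list[dict]) -> list[dict]:
--     """
--     Adapt traces for emergencies.
--
--     Trace data that may be updated:
--         - type: sos-past
--     """
--     start = -1
--     for idx, trace in enumerate(traces):
--         if trace["type"] == "sos":
--             if start == -1:
--                 start = idx
--             continue
--         if start > -1:
--             for i in range(start, idx):
--                 traces[i]["type"] = "sos-past"
--             start = -1
--
--     return traces
-- ===== SOURCE B (Python) =====
-- def check_for_sos(traces: list[dict]) -> list[dict]: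
--     """
--     Adapt traces for emergencies.
--
--     Trace data that may be updated:
--         - type: sos-past
--     """
--     last = -1
--     for idx, trace in enumerate(traces):
--         if trace["type"] != "sos":
--             last = idx
--     for idx in range(last):
--         if traces[idx]["type"] == "sos":
--             traces[idx]["type"] = "sos-past"
--     return traces
-- ===== Notes on version B (the rewrite author's own statement) =====
-- stated objective: simpler
-- what changed: Replaces A's start-pointer state machine with a nested back-fill loop by two flat passes: one scan computing the index of the last non-'sos' trace, then one conditional marking pass over the indices before it.
-- outside the precondition, e.g. on check_for_sos([{}]): A raises KeyError, B raises KeyError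
import Mathlib
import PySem

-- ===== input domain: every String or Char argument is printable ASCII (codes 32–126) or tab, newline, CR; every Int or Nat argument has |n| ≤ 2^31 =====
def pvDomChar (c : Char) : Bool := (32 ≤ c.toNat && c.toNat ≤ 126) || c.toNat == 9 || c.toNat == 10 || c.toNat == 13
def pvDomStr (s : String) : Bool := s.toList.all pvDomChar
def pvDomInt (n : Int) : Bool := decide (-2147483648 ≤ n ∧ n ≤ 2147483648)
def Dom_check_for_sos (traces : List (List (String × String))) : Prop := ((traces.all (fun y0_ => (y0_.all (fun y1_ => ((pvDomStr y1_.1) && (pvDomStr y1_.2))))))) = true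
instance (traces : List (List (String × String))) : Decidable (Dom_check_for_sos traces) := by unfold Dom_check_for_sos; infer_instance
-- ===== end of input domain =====

-- B replaces A's start-pointer state machine with a nested back-fill loop by one scan
-- computing the last non-"sos" index followed by one conditional marking pass (objective: simpler).
-- A and B mutate the argument list's dicts in place in Python; the equivalence proved here is about the returned value.

-- shared dict primitives: trace["type"] read and trace["type"] = "sos-past" write
def pvType (tr : List (String × String)) : String :=
  ((PySem.Dict.mk tr).get? "type").getD ""

def pvMark (tr : List (String × String)) : List (String × String) :=
  ((PySem.Dict.mk tr).insert "type" "sos-past").items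

-- ===== PORT A =====
-- inner loop: for i in range(start, idx): traces[i]["type"] = "sos-past"
def pvBackfill (ts : List (List (String × String))) (start idx : Int) :
    List (List (String × String)) :=
  (PySem.List.pyRange start idx 1).foldl
    (fun acc i => acc.set i.toNat (pvMark (acc.getD i.toNat []))) ts

-- loop body of A's enumerate loop; state = (start, traces)
def pvStepA (acc : Int × List (List (String × String))) (idx : Nat) :
    Int × List (List (String × String)) :=
  if pvType (acc.2.getD idx []) = "sos" then
    if acc.1 = -1 then ((idx : Int), acc.2) else acc
  else
    if acc.1 > -1 then (-1, pvBackfill acc.2 acc.1 (idx : Int))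
    else acc

def check_for_sos (traces : List (List (String × String))) : List (List (String × String)) :=
  ((List.range traces.length).foldl pvStepA (-1, traces)).2

-- ===== PORT B =====
-- first loop: last := index of the final non-"sos" trace (-1 if none)
def pvLastStep (traces : List (List (String × String))) (last : Int) (idx : Nat) : Int :=
  if pvType (traces.getD idx []) ≠ "sos" then (idx : Int) else last

-- second loop body: conditional marking of index i
def pvMarkStep (ts : List (List (String × String))) (i : Int) :
    List (List (String × String)) :=
  if pvType (ts.getD i.toNat []) = "sos" then ts.set i.toNat (pvMark (ts.getD i.toNat []))
  else ts

def check_for_sos_alt (traces : List (List (String × String))) : List (List (String × String)) :=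
  (PySem.List.pyRange 0 ((List.range traces.length).foldl (pvLastStep traces) (-1)) 1).foldl
    pvMarkStep traces

-- ===== PRECONDITION & SPEC =====
-- Pre_ excludes inputs where some trace dict has no "type" key: there the Python A raises KeyError.
def Pre_check_for_sos (traces : List (List (String × String))) : Prop :=
  ∀ tr ∈ traces, ((PySem.Dict.mk tr).contains "type") = true
instance (traces : List (List (String × String))) : Decidable (Pre_check_for_sos traces) := by
  unfold Pre_check_for_sos; infer_instance

def pvWitness_check_for_sos : (List (List (String × String))) :=
  [[("type", "sos")], [("type", "hike")], [("type", "sos")]]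

def Spec_check_for_sos (traces : List (List (String × String))) (out : List (List (String × String))) : Prop := out = check_for_sos_alt traces
instance (traces : List (List (String × String))) (out : List (List (String × String))) : Decidable (Spec_check_for_sos traces out) := by unfold Spec_check_for_sos; infer_instance

-- ===== CLAIM (what is proved, stated in full; the proofs are below) =====
def Claim_equal_check_for_sos : Prop := ∀ (traces : List (List (String × String))), Dom_check_for_sos traces → Pre_check_for_sos traces → Spec_check_for_sos traces (check_for_sos traces)

-- ===== LEMMAS AND PROOFS =====

-- the "type" of trace i of the original input
def pvT (traces : List (List (String × String))) (i : Nat) : String :=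
  pvType (traces.getD i [])

lemma pv_ext_getD {α : Type} (l1 l2 : List α) (d : α)
    (hlen : l1.length = l2.length)
    (h : ∀ i, i < l1.length → l1.getD i d = l2.getD i d) : l1 = l2 := by
  apply List.ext_getElem hlen
  intro i h1 h2
  have := h i h1
  rwa [List.getD_eq_getElem l1 d h1, List.getD_eq_getElem l2 d h2] at this

lemma pv_getD_set {α : Type} (l : List α) (j i : Nat) (x d : α) :
    (l.set j x).getD i d = if i = j ∧ j < l.length then x else l.getD i d := by
  by_cases hi : i < l.length
  · rw [List.getD_eq_getElem _ _ (by simpa using hi)]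
    split_ifs with h
    · obtain ⟨rfl, hj⟩ := h
      simp
    · rw [List.getElem_set_ne, ← List.getD_eq_getElem]
      intro hij; exact h ⟨hij.symm, by omega⟩
  · rw [List.getD_eq_default, List.getD_eq_default] <;> try simpa using hi
    split_ifs with h
    · omega
    · rfl

-- characterization of A's back-fill loop
lemma pvBackfill_char (ts : List (List (String × String))) (s k : Nat)
    (hk : k ≤ ts.length) :
    (pvBackfill ts (s : Int) (k : Int)).length = ts.length ∧
    ∀ i, ((s ≤ i ∧ i < k) → (pvBackfill ts (s : Int) (k : Int)).getD i [] = pvMark (ts.getD i [])) ∧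
         (¬(s ≤ i ∧ i < k) → (pvBackfill ts (s : Int) (k : Int)).getD i [] = ts.getD i []) := by
  induction k with
  | zero =>
      refine ⟨by simp [pvBackfill, PySem.List.pyRange_one_eq_nil (by omega : (0:Int) ≤ (s:Int))],
        fun i => ⟨fun h => absurd h.2 (by omega), fun _ => by
          simp [pvBackfill, PySem.List.pyRange_one_eq_nil (by omega : (0:Int) ≤ (s:Int))]⟩⟩
  | succ k ih =>
      by_cases hs : s ≤ k
      · have ih' := ih (by omega)
        have hr : pvBackfill ts (s:Int) ((k+1 : Nat):Int)
            = (pvBackfill ts (s:Int) (k:Int)).set k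
                (pvMark ((pvBackfill ts (s:Int) (k:Int)).getD k [])) := by
          unfold pvBackfill
          rw [show ((k+1:Nat):Int) = (k:Int)+1 by push_cast; ring,
              PySem.List.pyRange_one_succ_right (by exact_mod_cast hs), List.foldl_append]
          simp
        have hBk : (pvBackfill ts (s:Int) (k:Int)).getD k [] = ts.getD k [] :=
          (ih'.2 k).2 (by omega)
        have hlen : (pvBackfill ts (s:Int) (k:Int)).length = ts.length := ih'.1
        refine ⟨by rw [hr]; simp [hlen], fun i => ?_⟩
        rw [hr, hBk, pv_getD_set]
        constructor
        · intro h
          by_cases hik : i = k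
          · subst hik; rw [if_pos ⟨rfl, by omega⟩]
          · rw [if_neg (fun hh => hik hh.1)]
            exact (ih'.2 i).1 ⟨h.1, by omega⟩
        · intro h
          rw [if_neg (by rintro ⟨rfl, -⟩; exact h ⟨hs, by omega⟩)]
          exact (ih'.2 i).2 (fun hh => h ⟨hh.1, by omega⟩)
      · refine ⟨by simp [pvBackfill,
            PySem.List.pyRange_one_eq_nil (by omega : ((k:Int)+1) ≤ (s:Int))],
          fun i => ⟨fun h => absurd h (by omega), fun _ => by
            simp [pvBackfill,
              PySem.List.pyRange_one_eq_nil (by omega : ((k:Int)+1) ≤ (s:Int))]⟩⟩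

-- invariant of A's main loop after k steps
def pvInvA (traces : List (List (String × String))) (k : Nat)
    (st : Int × List (List (String × String))) : Prop :=
  st.2.length = traces.length ∧
  (∀ i,
    ((pvT traces i = "sos" ∧ ∃ j, i < j ∧ j < k ∧ pvT traces j ≠ "sos") →
        st.2.getD i [] = pvMark (traces.getD i [])) ∧
    (¬(pvT traces i = "sos" ∧ ∃ j, i < j ∧ j < k ∧ pvT traces j ≠ "sos") →
        st.2.getD i [] = traces.getD i [])) ∧
  (st.1 = -1 → (k = 0 ∨ pvT traces (k - 1) ≠ "sos")) ∧
  (st.1 ≠ -1 → 0 ≤ st.1 ∧ st.1.toNat < k ∧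
    (∀ i, st.1.toNat ≤ i → i < k → pvT traces i = "sos") ∧
    (st.1.toNat = 0 ∨ pvT traces (st.1.toNat - 1) ≠ "sos"))

lemma pvInvA_fold (traces : List (List (String × String))) (k : Nat)
    (hk : k ≤ traces.length) :
    pvInvA traces k ((List.range k).foldl pvStepA (-1, traces)) := by
  induction k with
  | zero =>
      unfold pvInvA
      exact ⟨rfl, fun i => ⟨fun h => absurd h.2 (by rintro ⟨j, -, hj, -⟩; omega),
        fun _ => rfl⟩, fun _ => Or.inl rfl, fun h => absurd rfl h⟩
  | succ k ih =>
      have ih' := ih (by omega)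
      rw [List.range_succ, List.foldl_append, List.foldl_cons, List.foldl_nil]
      unfold pvInvA at ih' ⊢
      set st := (List.range k).foldl pvStepA (-1, traces) with hst
      obtain ⟨hlen, hmark, hneg, hpos⟩ := ih'
      have hread : st.2.getD k [] = traces.getD k [] :=
        (hmark k).2 (by rintro ⟨-, j, h1, h2, -⟩; omega)
      by_cases hty : pvType (traces.getD k []) = "sos"
      · have hstep : pvStepA st k = if st.1 = -1 then ((k:Int), st.2) else st := by
          unfold pvStepA
          rw [hread, if_pos hty]
        by_cases hne : st.1 = -1
        · rw [hstep, if_pos hne]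
          refine ⟨hlen, fun i => ⟨?_, ?_⟩, fun h => absurd h (by omega), fun _ => ?_⟩
          · rintro ⟨hti, j, h1, h2, h3⟩
            have hjk : j < k := by
              rcases Nat.lt_succ_iff_lt_or_eq.mp h2 with h | h
              · exact h
              · exact absurd hty (h ▸ h3)
            exact (hmark i).1 ⟨hti, j, h1, hjk, h3⟩
          · intro h
            exact (hmark i).2 (fun hh => h ⟨hh.1, by
              obtain ⟨j, a, b, c⟩ := hh.2; exact ⟨j, a, by omega, c⟩⟩)
          · have htn : ((k:Int)).toNat = k := Int.toNat_natCast k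
            refine ⟨by omega, by omega, ?_, ?_⟩
            · intro i hi1 hi2
              rw [htn] at hi1
              have : i = k := by omega
              subst this; exact hty
            · rw [htn]
              exact hneg hne
        · rw [hstep, if_neg hne]
          obtain ⟨hp0, hp1, hp2, hp3⟩ := hpos hne
          refine ⟨hlen, fun i => ⟨?_, ?_⟩, fun h => absurd h hne,
            fun _ => ⟨hp0, by omega, ?_, hp3⟩⟩
          · rintro ⟨hti, j, h1, h2, h3⟩
            have hjk : j < k := by
              rcases Nat.lt_succ_iff_lt_or_eq.mp h2 with h | h
              · exact h
              · exact absurd hty (h ▸ h3)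
            exact (hmark i).1 ⟨hti, j, h1, hjk, h3⟩
          · intro h
            exact (hmark i).2 (fun hh => h ⟨hh.1, by
              obtain ⟨j, a, b, c⟩ := hh.2; exact ⟨j, a, by omega, c⟩⟩)
          · intro i hi1 hi2
            rcases Nat.lt_or_ge i k with h | h
            · exact hp2 i hi1 h
            · have : i = k := by omega
              subst this; exact hty
      · have hstep : pvStepA st k =
            if st.1 > -1 then (-1, pvBackfill st.2 st.1 (k:Int)) else st := by
          unfold pvStepA
          rw [hread, if_neg hty]
        by_cases hgt : st.1 > -1
        · have hne : st.1 ≠ -1 := by omega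
          obtain ⟨hp0, hp1, hp2, hp3⟩ := hpos hne
          rw [hstep, if_pos hgt]
          set sN := st.1.toNat with hsN
          have hcast : st.1 = (sN : Int) := by omega
          have bc := pvBackfill_char st.2 sN k (by rw [hlen]; omega)
          refine ⟨by rw [hcast, bc.1, hlen], fun i => ⟨?_, ?_⟩,
            fun _ => Or.inr (by simp only [Nat.add_sub_cancel, pvT]; exact hty),
            fun h => absurd rfl h⟩
          · rintro ⟨hti, j, hj1, hj2, hj3⟩
            have hik : i < k := by
              by_cases hjk : j < k
              · omega
              · have hjeq : j = k := by omega
                omega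
            simp only [hcast]
            by_cases hsi : sN ≤ i
            · rw [(bc.2 i).1 ⟨hsi, hik⟩,
                (hmark i).2 (by rintro ⟨-, j', a, b, c⟩; exact c (hp2 j' (by omega) b))]
            · rw [(bc.2 i).2 (by omega)]
              apply (hmark i).1
              have hb : pvT traces (sN - 1) ≠ "sos" := by
                rcases hp3 with h0 | hb
                · omega
                · exact hb
              have hi1 : i < sN - 1 := by
                rcases Nat.lt_or_ge i (sN - 1) with h | h
                · exact h
                · have : i = sN - 1 := by omega
                  rw [← this] at hb; exact absurd hti hb
              exact ⟨hti, sN - 1, hi1, by omega, hb⟩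
          · intro h
            simp only [hcast]
            have hnotrun : ¬ (sN ≤ i ∧ i < k) := by
              rintro ⟨a, b⟩
              exact h ⟨hp2 i a b, k, b, by omega, hty⟩
            rw [(bc.2 i).2 hnotrun]
            exact (hmark i).2 (fun hh => h ⟨hh.1, by
              obtain ⟨j, a, b, c⟩ := hh.2; exact ⟨j, a, by omega, c⟩⟩)
        · rw [hstep, if_neg hgt]
          have h1 : st.1 = -1 := by
            by_contra hne
            have := (hpos hne).1; omega
          have hb := hneg h1
          refine ⟨hlen, fun i => ⟨?_, ?_⟩,
            fun _ => Or.inr (by simp only [Nat.add_sub_cancel, pvT]; exact hty),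
            fun h => absurd h1 h⟩
          · rintro ⟨hti, j, hj1, hj2, hj3⟩
            apply (hmark i).1
            by_cases hjk : j < k
            · exact ⟨hti, j, hj1, hjk, hj3⟩
            · have hbk : pvT traces (k - 1) ≠ "sos" := by
                rcases hb with h0 | hbb
                · omega
                · exact hbb
              have hik1 : i < k - 1 := by
                rcases Nat.lt_or_ge i (k - 1) with h | h
                · exact h
                · have : i = k - 1 := by omega
                  rw [← this] at hbk; exact absurd hti hbk
              exact ⟨hti, k - 1, hik1, by omega, hbk⟩
          · intro h
            exact (hmark i).2 (fun hh => h ⟨hh.1, by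
              obtain ⟨j, a, b, c⟩ := hh.2; exact ⟨j, a, by omega, c⟩⟩)

-- characterization of B's first loop after k steps
lemma pvLast_fold (traces : List (List (String × String))) (k : Nat) (hk : k ≤ traces.length) :
    (((List.range k).foldl (pvLastStep traces) (-1) = -1 ∧ ∀ j, j < k → pvT traces j = "sos") ∨
     (0 ≤ (List.range k).foldl (pvLastStep traces) (-1) ∧
      ((List.range k).foldl (pvLastStep traces) (-1)).toNat < k ∧
      pvT traces ((List.range k).foldl (pvLastStep traces) (-1)).toNat ≠ "sos" ∧
      ∀ j, ((List.range k).foldl (pvLastStep traces) (-1)).toNat < j → j < k → pvT traces j = "sos")) := by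
  induction k with
  | zero =>
      exact Or.inl ⟨rfl, fun j hj => absurd hj (by omega)⟩
  | succ k ih =>
      have ih' := ih (by omega)
      rw [List.range_succ, List.foldl_append, List.foldl_cons, List.foldl_nil]
      set L := (List.range k).foldl (pvLastStep traces) (-1) with hL
      by_cases hty : pvType (traces.getD k []) = "sos"
      · have hstep : pvLastStep traces L k = L := by
          unfold pvLastStep
          rw [if_neg (not_not_intro hty)]
        rw [hstep]
        rcases ih' with ⟨h1, h2⟩ | ⟨h1, h2, h3, h4⟩
        · refine Or.inl ⟨h1, fun j hj => ?_⟩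
          rcases Nat.lt_succ_iff_lt_or_eq.mp hj with h | h
          · exact h2 j h
          · subst h; exact hty
        · refine Or.inr ⟨h1, by omega, h3, fun j hj1 hj2 => ?_⟩
          rcases Nat.lt_succ_iff_lt_or_eq.mp hj2 with h | h
          · exact h4 j hj1 h
          · subst h; exact hty
      · have hstep : pvLastStep traces L k = (k:Int) := by
          unfold pvLastStep
          rw [if_pos hty]
        rw [hstep]
        refine Or.inr ⟨by omega, by omega, by rw [Int.toNat_natCast]; exact hty,
          fun j hj1 hj2 => absurd hj2 (by omega)⟩

-- characterization of B's second loop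
lemma pvMark_fold (ts : List (List (String × String))) (m : Nat) (hm : m ≤ ts.length) :
    ((PySem.List.pyRange 0 (m : Int) 1).foldl pvMarkStep ts).length = ts.length ∧
    ∀ i, ((i < m ∧ pvType (ts.getD i []) = "sos") →
            ((PySem.List.pyRange 0 (m : Int) 1).foldl pvMarkStep ts).getD i [] = pvMark (ts.getD i [])) ∧
         (¬(i < m ∧ pvType (ts.getD i []) = "sos") →
            ((PySem.List.pyRange 0 (m : Int) 1).foldl pvMarkStep ts).getD i [] = ts.getD i []) := by
  induction m with
  | zero =>
      refine ⟨by simp [PySem.List.pyRange_one_eq_nil (le_refl (0:Int))],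
        fun i => ⟨fun h => absurd h.1 (by omega), fun _ => by
          simp [PySem.List.pyRange_one_eq_nil (le_refl (0:Int))]⟩⟩
  | succ m ih =>
      have ih' := ih (by omega)
      have hr : PySem.List.pyRange 0 ((m+1 : Nat) : Int) 1
          = PySem.List.pyRange 0 (m : Int) 1 ++ [(m : Int)] := by
        rw [show ((m+1 : Nat) : Int) = (m : Int) + 1 by push_cast; ring]
        exact PySem.List.pyRange_one_succ_right (by omega)
      rw [hr, List.foldl_append, List.foldl_cons, List.foldl_nil]
      set M := (PySem.List.pyRange 0 (m : Int) 1).foldl pvMarkStep ts with hM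
      have hread : M.getD m [] = ts.getD m [] := (ih'.2 m).2 (by rintro ⟨h, -⟩; omega)
      have hMl : M.length = ts.length := ih'.1
      by_cases hty : pvType (ts.getD m []) = "sos"
      · have hstep : pvMarkStep M (m : Int) = M.set m (pvMark (ts.getD m [])) := by
          unfold pvMarkStep
          rw [Int.toNat_natCast, hread, if_pos hty]
        rw [hstep]
        refine ⟨by simp [hMl], fun i => ⟨?_, ?_⟩⟩
        · intro h
          rw [pv_getD_set]
          by_cases him : i = m
          · subst him; rw [if_pos ⟨rfl, by omega⟩]
          · rw [if_neg (fun hh => him hh.1)]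
            exact (ih'.2 i).1 ⟨by omega, h.2⟩
        · intro h
          rw [pv_getD_set, if_neg (by rintro ⟨rfl, -⟩; exact h ⟨by omega, hty⟩)]
          exact (ih'.2 i).2 (fun hh => h ⟨by omega, hh.2⟩)
      · have hstep : pvMarkStep M (m : Int) = M := by
          unfold pvMarkStep
          rw [Int.toNat_natCast, hread, if_neg hty]
        rw [hstep]
        refine ⟨hMl, fun i => ⟨?_, ?_⟩⟩
        · intro h
          apply (ih'.2 i).1
          refine ⟨?_, h.2⟩
          rcases Nat.lt_succ_iff_lt_or_eq.mp h.1 with hh | hh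
          · exact hh
          · subst hh; exact absurd h.2 hty
        · intro h
          exact (ih'.2 i).2 (fun hh => h ⟨by omega, hh.2⟩)

-- ===== VERDICT (by name: the statement is the Claim_ definition above) =====
theorem check_for_sos_spec : Claim_equal_check_for_sos := by
  unfold Claim_equal_check_for_sos
  intro traces _ _
  unfold Spec_check_for_sos check_for_sos check_for_sos_alt
  have IA := pvInvA_fold traces traces.length (le_refl _)
  unfold pvInvA at IA
  obtain ⟨hlen, hmark, -, -⟩ := IA
  rcases pvLast_fold traces traces.length (le_refl _) with ⟨h1, h2⟩ | ⟨h1, h2, h3, h4⟩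
  · rw [h1, PySem.List.pyRange_one_eq_nil (by omega : (-1 : Int) ≤ 0), List.foldl_nil]
    refine pv_ext_getD _ _ [] hlen ?_
    intro i hi
    exact (hmark i).2 (by rintro ⟨-, j, -, hj2, hj3⟩; exact hj3 (h2 j hj2))
  · set L := (List.range traces.length).foldl (pvLastStep traces) (-1) with hLdef
    have hm : L = ((L.toNat : Nat) : Int) := by omega
    rw [hm]
    have MB := pvMark_fold traces L.toNat (by omega)
    refine pv_ext_getD _ _ [] (by rw [hlen, MB.1]) ?_
    intro i hi
    by_cases hc : i < L.toNat ∧ pvType (traces.getD i []) = "sos"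
    · rw [(MB.2 i).1 hc]
      exact (hmark i).1 ⟨hc.2, L.toNat, hc.1, by omega, h3⟩
    · rw [(MB.2 i).2 hc]
      apply (hmark i).2
      rintro ⟨hs, j, hj1, hj2, hj3⟩
      have hjL : j ≤ L.toNat := by
        by_contra hgt
        exact hj3 (h4 j (by omega) hj2)
      exact hc ⟨by omega, hs⟩
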